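-- pv_equiv track=rewrite | github.com/Ghiora/Gad-Drori | book_keeping_v.py | compare_subjects
-- ===== SOURCE A (Python) =====
-- def compare_subjects (history1,history2,math1,math2):
--     better_at_history={}
--     better_at_math={}
--     better_at={}
--     for key in history1:
--         if key in history2:
--             if history1[key]>history2[key]:
--                 better_at_history[key]=history1[key]
--                 better_at_history[key] = 'History1'
--             else:
--                 better_at_history[key]=history2[key]
--                 better_at_history[key] = 'History2'
--     for key in math1:
--         if key in math2:
--             if math1[key]>math2[key]:
--                 better_at_math[key]=math1[key]
--                 better_at_math[key] = 'Math1'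
--             else:
--                 better_at_math[key]=math2[key]
--                 better_at_math[key] = 'Math2'
--
--     for key in better_at_math:
--         if key in better_at_history:
--             if better_at_math[key]>better_at_history[key]:
--                 better_at[key]=better_at_math[key]
--             else:
--                 better_at[key]=better_at_history[key]
--     return better_at
-- ===== SOURCE B (Python) =====
-- def compare_subjects(history1, history2, math1, math2):
--     result = {}
--     for key in math1:
--         if key in math2 and key in history1 and key in history2:
--             math_label = 'Math1' if math1[key] > math2[key] else 'Math2'
--             hist_label = 'History1' if history1[key] > history2[key] else 'History2'
--             result[key] = math_label if math_label > hist_label else hist_label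
--     return result
-- ===== Notes on version B (the rewrite author's own statement) =====
-- stated objective: simpler
-- what changed: One direct pass over math1 producing the result dict, instead of building two intermediate winner dicts (better_at_history, better_at_math) and then intersecting them in a third loop; the literal label-string comparison is kept.
import Mathlib
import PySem

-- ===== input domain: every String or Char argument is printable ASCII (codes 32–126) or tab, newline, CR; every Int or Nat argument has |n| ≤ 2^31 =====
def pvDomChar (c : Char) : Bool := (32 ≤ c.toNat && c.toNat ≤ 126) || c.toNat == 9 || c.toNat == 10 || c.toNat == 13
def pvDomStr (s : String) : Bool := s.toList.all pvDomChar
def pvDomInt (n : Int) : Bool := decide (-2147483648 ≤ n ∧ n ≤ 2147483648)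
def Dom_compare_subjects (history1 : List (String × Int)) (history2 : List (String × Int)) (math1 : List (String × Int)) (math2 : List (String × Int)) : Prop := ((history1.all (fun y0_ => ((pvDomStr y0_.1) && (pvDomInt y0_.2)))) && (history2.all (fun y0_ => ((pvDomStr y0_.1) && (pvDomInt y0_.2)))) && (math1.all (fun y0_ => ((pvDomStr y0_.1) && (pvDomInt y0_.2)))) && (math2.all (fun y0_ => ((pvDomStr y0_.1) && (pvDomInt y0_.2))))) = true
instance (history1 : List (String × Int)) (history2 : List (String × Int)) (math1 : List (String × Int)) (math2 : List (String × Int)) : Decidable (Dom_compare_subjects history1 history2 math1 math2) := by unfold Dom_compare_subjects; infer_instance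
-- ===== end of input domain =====

-- ===== PORT A =====
-- B replaces A's three passes (two intermediate winner dicts, then an intersecting loop)
-- by one direct pass over math1; objective: simpler. Return-value equivalence only.
-- In A's branches the first assignment better_at_*[key]=<int> is dead (immediately
-- overwritten by the label string in the same branch); the port keeps only the net string store.
def compare_subjects (history1 : List (String × Int)) (history2 : List (String × Int)) (math1 : List (String × Int)) (math2 : List (String × Int)) : List (String × String) :=
  let H1 := PySem.Dict.ofList history1
  let H2 := PySem.Dict.ofList history2
  let M1 := PySem.Dict.ofList math1
  let M2 := PySem.Dict.ofList math2
  let better_at_history := H1.keys.foldl (fun d key =>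
      if H2.contains key then
        if H1.getD key 0 > H2.getD key 0 then d.insert key "History1"
        else d.insert key "History2"
      else d) PySem.Dict.empty
  let better_at_math := M1.keys.foldl (fun d key =>
      if M2.contains key then
        if M1.getD key 0 > M2.getD key 0 then d.insert key "Math1"
        else d.insert key "Math2"
      else d) PySem.Dict.empty
  let better_at := better_at_math.keys.foldl (fun d key =>
      if better_at_history.contains key then
        if decide (better_at_history.getD key "" < better_at_math.getD key "") then
          d.insert key (better_at_math.getD key "")
        else d.insert key (better_at_history.getD key "")
      else d) PySem.Dict.empty
  better_at.items

-- ===== PORT B =====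
def compare_subjects_alt (history1 : List (String × Int)) (history2 : List (String × Int)) (math1 : List (String × Int)) (math2 : List (String × Int)) : List (String × String) :=
  let H1 := PySem.Dict.ofList history1
  let H2 := PySem.Dict.ofList history2
  let M1 := PySem.Dict.ofList math1
  let M2 := PySem.Dict.ofList math2
  let result := M1.keys.foldl (fun d key =>
      if M2.contains key && H1.contains key && H2.contains key then
        let math_label := if M1.getD key 0 > M2.getD key 0 then "Math1" else "Math2"
        let hist_label := if H1.getD key 0 > H2.getD key 0 then "History1" else "History2"
        d.insert key (if decide (hist_label < math_label) then math_label else hist_label)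
      else d) PySem.Dict.empty
  result.items

-- ===== PRECONDITION & SPEC =====
def Spec_compare_subjects (history1 : List (String × Int)) (history2 : List (String × Int)) (math1 : List (String × Int)) (math2 : List (String × Int)) (out : List (String × String)) : Prop := out = compare_subjects_alt history1 history2 math1 math2
instance (history1 : List (String × Int)) (history2 : List (String × Int)) (math1 : List (String × Int)) (math2 : List (String × Int)) (out : List (String × String)) : Decidable (Spec_compare_subjects history1 history2 math1 math2 out) := by unfold Spec_compare_subjects; infer_instance

-- ===== CLAIM (what is proved, stated in full; the proofs are below) =====
def Claim_equal_compare_subjects : Prop := ∀ (history1 : List (String × Int)) (history2 : List (String × Int)) (math1 : List (String × Int)) (math2 : List (String × Int)), Dom_compare_subjects history1 history2 math1 math2 → Spec_compare_subjects history1 history2 math1 math2 (compare_subjects history1 history2 math1 math2)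

-- ===== LEMMAS AND PROOFS =====

-- a conditional insert-loop over distinct keys into an empty dict produces exactly the filtered key list paired with the value function
theorem pv_condInsert_items (l : List String) (p : String → Bool) (f : String → String)
    (h : l.Nodup) :
    (l.foldl (fun d k => if p k then d.insert k (f k) else d)
        (PySem.Dict.empty : PySem.Dict String String)).items
      = (l.filter p).map (fun k => (k, f k)) := by
  rw [← List.foldl_filter]
  rw [PySem.Dict.items_foldl_insert_fresh (l := l.filter p) (k := fun a => a) (v := f)
        (d := PySem.Dict.empty) (by simp) (by simpa using h.filter p)]
  simp [PySem.Dict.empty]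

-- winner labels of the first two loops, as functions of the key
def hlabelF (H1 H2 : PySem.Dict String Int) (k : String) : String :=
  if H1.getD k 0 > H2.getD k 0 then "History1" else "History2"
def mlabelF (M1 M2 : PySem.Dict String Int) (k : String) : String :=
  if M1.getD k 0 > M2.getD k 0 then "Math1" else "Math2"

-- shape of A's first two loops
theorem pv_loop_items (H1 H2 : PySem.Dict String Int) (s1 s2 : String) (hnd : H1.keys.Nodup) :
    (H1.keys.foldl (fun d key =>
      if H2.contains key then
        if H1.getD key 0 > H2.getD key 0 then d.insert key s1
        else d.insert key s2
      else d) PySem.Dict.empty).items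
      = (H1.keys.filter (fun k => H2.contains k)).map
          (fun k => (k, if H1.getD k 0 > H2.getD k 0 then s1 else s2)) := by
  have hb : (fun (d : PySem.Dict String String) key =>
      if H2.contains key then
        if H1.getD key 0 > H2.getD key 0 then d.insert key s1
        else d.insert key s2
      else d)
    = (fun d key => if H2.contains key then
        d.insert key (if H1.getD key 0 > H2.getD key 0 then s1 else s2) else d) := by
    funext d k; split_ifs <;> rfl
  rw [hb, pv_condInsert_items _ _ _ hnd]

-- ===== VERDICT (by name: the statement is the Claim_ definition above) =====
theorem compare_subjects_spec : Claim_equal_compare_subjects := by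
  intro history1 history2 math1 math2 _
  unfold Spec_compare_subjects compare_subjects compare_subjects_alt
  dsimp only
  set H1 := PySem.Dict.ofList history1 with hH1
  set H2 := PySem.Dict.ofList history2 with hH2
  set M1 := PySem.Dict.ofList math1 with hM1
  set M2 := PySem.Dict.ofList math2 with hM2
  set bh := (H1.keys.foldl (fun d key =>
      if H2.contains key then
        if H1.getD key 0 > H2.getD key 0 then d.insert key "History1"
        else d.insert key "History2"
      else d) PySem.Dict.empty) with hbhdef
  set bm := (M1.keys.foldl (fun d key =>
      if M2.contains key then
        if M1.getD key 0 > M2.getD key 0 then d.insert key "Math1"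
        else d.insert key "Math2"
      else d) PySem.Dict.empty) with hbmdef
  have hbh : bh.items = (H1.keys.filter (fun k => H2.contains k)).map (fun k => (k, hlabelF H1 H2 k)) := by
    rw [hbhdef, pv_loop_items _ _ _ _ (PySem.Dict.nodup_keys_ofList history1)]; rfl
  have hbm : bm.items = (M1.keys.filter (fun k => M2.contains k)).map (fun k => (k, mlabelF M1 M2 k)) := by
    rw [hbmdef, pv_loop_items _ _ _ _ (PySem.Dict.nodup_keys_ofList math1)]; rfl
  have hbhkeys : bh.keys = H1.keys.filter (fun k => H2.contains k) := by
    simp [PySem.Dict.keys, hbh, Function.comp_def]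
  have hbmkeys : bm.keys = M1.keys.filter (fun k => M2.contains k) := by
    simp [PySem.Dict.keys, hbm, Function.comp_def]
  have hbhnodup : bh.keys.Nodup := by
    rw [hbhkeys]; exact (PySem.Dict.nodup_keys_ofList history1).filter _
  have hbmnodup : bm.keys.Nodup := by
    rw [hbmkeys]; exact (PySem.Dict.nodup_keys_ofList math1).filter _
  have hbhc : ∀ k, bh.contains k = (H1.contains k && H2.contains k) := by
    intro k
    rw [PySem.Dict.contains_eq_decide_mem_keys, hbhkeys,
        PySem.Dict.contains_eq_decide_mem_keys (d := H1)]
    simp [List.mem_filter, Bool.decide_and]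
  have hbhgetD : ∀ k ∈ H1.keys.filter (fun k => H2.contains k), bh.getD k "" = hlabelF H1 H2 k := by
    intro k hk
    exact PySem.Dict.getD_of_mem_items bh (by rw [hbh]; exact List.mem_map_of_mem hk) hbhnodup ""
  have hbmgetD : ∀ k ∈ M1.keys.filter (fun k => M2.contains k), bm.getD k "" = mlabelF M1 M2 k := by
    intro k hk
    exact PySem.Dict.getD_of_mem_items bm (by rw [hbm]; exact List.mem_map_of_mem hk) hbmnodup ""
  have hb3 : (fun (d : PySem.Dict String String) key =>
      if bh.contains key then
        if decide (bh.getD key "" < bm.getD key "") then d.insert key (bm.getD key "")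
        else d.insert key (bh.getD key "")
      else d)
    = (fun d key => if bh.contains key then d.insert key
        (if decide (bh.getD key "" < bm.getD key "") then bm.getD key ""
         else bh.getD key "") else d) := by
    funext d k; split_ifs <;> rfl
  have hbB : (fun (d : PySem.Dict String String) key =>
      if M2.contains key && H1.contains key && H2.contains key then
        let math_label := if M1.getD key 0 > M2.getD key 0 then "Math1" else "Math2"
        let hist_label := if H1.getD key 0 > H2.getD key 0 then "History1" else "History2"
        d.insert key (if decide (hist_label < math_label) then math_label else hist_label)
      else d)
    = (fun d key => if M2.contains key && H1.contains key && H2.contains key then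
        d.insert key (if decide (hlabelF H1 H2 key < mlabelF M1 M2 key) then mlabelF M1 M2 key
          else hlabelF H1 H2 key) else d) := by
    funext d k; rfl
  rw [hb3, hbB, hbmkeys,
      pv_condInsert_items _ _ _ ((PySem.Dict.nodup_keys_ofList math1).filter _),
      pv_condInsert_items _ _ _ (PySem.Dict.nodup_keys_ofList math1),
      List.filter_filter]
  have hpe : ∀ k ∈ M1.keys, (bh.contains k && M2.contains k)
      = (M2.contains k && H1.contains k && H2.contains k) := by
    intro k _
    rw [hbhc k]
    cases H1.contains k <;> cases H2.contains k <;> cases M2.contains k <;> rfl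
  rw [List.filter_congr hpe]
  refine List.map_congr_left ?_
  intro k hk
  simp only [List.mem_filter, Bool.and_eq_true] at hk
  obtain ⟨hk1, ⟨hM2c, hH1c⟩, hH2c⟩ := hk
  rw [hbmgetD k (List.mem_filter.mpr ⟨hk1, hM2c⟩),
      hbhgetD k (List.mem_filter.mpr ⟨(PySem.Dict.contains_iff_mem_keys H1 k).mp hH1c, hH2c⟩)]
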